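-- pv_equiv track=rewrite | github.com/TheGammaSqueeze/GammaOSDistribution | tools/test/connectivity/acts_tests/tests/google/fuchsia/bt/command_input.py | complete_btc_pair
-- ===== SOURCE A (Python) =====
-- def complete_btc_pair(text, line, begidx, endidx):
--     """ Provides auto-complete for btc_pair cmd.
--
--     See Cmd module for full description.
--     """
--     arg_completion = len(line.split(" ")) - 1
--     pairing_security_level_options = ['ENCRYPTED', 'AUTHENTICATED', 'NONE']
--     bondable_options = ['BONDABLE', 'NON_BONDABLE', 'NONE']
--     transport_options = ['BREDR', 'LE']
--     if arg_completion == 1: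
--         if not text:
--             completions = pairing_security_level_options
--         else:
--             completions = [
--                 s for s in pairing_security_level_options
--                 if s.startswith(text)
--             ]
--         return completions
--     if arg_completion == 2:
--         if not text:
--             completions = bondable_options
--         else:
--             completions = [
--                 s for s in bondable_options if s.startswith(text)
--             ]
--         return completions
--     if arg_completion == 3:
--         if not text:
--             completions = transport_options
--         else:
--             completions = [
--                 s for s in transport_options if s.startswith(text)
--             ]
--         return completions
-- ===== SOURCE B (Python) =====
-- # Flat candidate table tagged by argument position, consumed in ONE pass:
-- # no per-position list selection, no per-position branches.
-- _BTC_PAIR_CANDIDATES = (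
--     (1, 'ENCRYPTED'), (1, 'AUTHENTICATED'), (1, 'NONE'),
--     (2, 'BONDABLE'), (2, 'NON_BONDABLE'), (2, 'NONE'),
--     (3, 'BREDR'), (3, 'LE'),
-- )
--
--
-- def complete_btc_pair(text, line, begidx, endidx):
--     """Auto-complete for btc_pair: single scan over a flat tagged table."""
--     n = line.count(' ')  # argument position = number of spaces in the line
--     known = False
--     completions = []
--     for slot, word in _BTC_PAIR_CANDIDATES:
--         if slot == n:
--             known = True
--             if word.startswith(text):
--                 completions.append(word)
--     return completions if known else None
-- ===== Notes on version B (the rewrite author's own statement) =====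
-- stated objective: alternative
-- what changed: Replaces the three copy-pasted per-position if-blocks (each selecting its own option list and special-casing empty text) by one flat table of (position, option) pairs consumed in a single accumulator pass, with the argument position computed by counting spaces instead of splitting the line.
import Mathlib
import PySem

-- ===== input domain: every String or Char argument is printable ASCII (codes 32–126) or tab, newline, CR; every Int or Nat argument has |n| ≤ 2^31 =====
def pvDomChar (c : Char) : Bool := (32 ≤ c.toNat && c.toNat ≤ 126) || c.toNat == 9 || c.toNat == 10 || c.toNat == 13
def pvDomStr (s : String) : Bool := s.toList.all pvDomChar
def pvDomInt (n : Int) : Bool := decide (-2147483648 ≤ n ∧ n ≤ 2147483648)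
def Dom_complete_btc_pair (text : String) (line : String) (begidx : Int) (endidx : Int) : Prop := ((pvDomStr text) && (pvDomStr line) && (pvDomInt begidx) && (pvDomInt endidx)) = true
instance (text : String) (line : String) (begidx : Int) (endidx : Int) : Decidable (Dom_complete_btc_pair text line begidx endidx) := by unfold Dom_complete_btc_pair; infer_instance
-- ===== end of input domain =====

-- B replaces the three per-position if-blocks by one flat tagged candidate table scanned in a single
-- accumulator pass, computing the argument position by counting spaces (objective: alternative).

-- ===== PORT A =====
def complete_btc_pair (text : String) (line : String) (begidx : Int) (endidx : Int) : Option (List String) :=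
  let arg_completion : Int := PySem.List.len (((PySem.Str.split? line " ").getD [])) - 1
  let pairing_security_level_options : List String := ["ENCRYPTED", "AUTHENTICATED", "NONE"]
  let bondable_options : List String := ["BONDABLE", "NON_BONDABLE", "NONE"]
  let transport_options : List String := ["BREDR", "LE"]
  if arg_completion = 1 then
    some (if text = "" then pairing_security_level_options
          else pairing_security_level_options.filter (fun s => PySem.Str.startswith s text))
  else if arg_completion = 2 then
    some (if text = "" then bondable_options
          else bondable_options.filter (fun s => PySem.Str.startswith s text))
  else if arg_completion = 3 then
    some (if text = "" then transport_options
          else transport_options.filter (fun s => PySem.Str.startswith s text))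
  else none  -- Python falls off the end: returns None

-- ===== PORT B =====
def pvBtcCandidates : List (Int × String) :=
  [(1, "ENCRYPTED"), (1, "AUTHENTICATED"), (1, "NONE"),
   (2, "BONDABLE"), (2, "NON_BONDABLE"), (2, "NONE"),
   (3, "BREDR"), (3, "LE")]

def complete_btc_pair_alt (text : String) (line : String) (begidx : Int) (endidx : Int) : Option (List String) :=
  let n : Int := (PySem.Str.count line " " : Int)
  -- single pass: state = (known, completions), as in Source B's loop
  let st := pvBtcCandidates.foldl
    (fun (st : Bool × List String) p =>
      if p.1 = n then
        (true, if PySem.Str.startswith p.2 text then st.2 ++ [p.2] else st.2)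
      else st)
    (false, [])
  if st.1 then some st.2 else none

-- ===== PRECONDITION & SPEC =====
def Spec_complete_btc_pair (text : String) (line : String) (begidx : Int) (endidx : Int) (out : Option (List String)) : Prop := out = complete_btc_pair_alt text line begidx endidx
instance (text : String) (line : String) (begidx : Int) (endidx : Int) (out : Option (List String)) : Decidable (Spec_complete_btc_pair text line begidx endidx out) := by unfold Spec_complete_btc_pair; infer_instance

-- ===== CLAIM (what is proved, stated in full; the proofs are below) =====
def Claim_equal_complete_btc_pair : Prop := ∀ (text : String) (line : String) (begidx : Int) (endidx : Int), Dom_complete_btc_pair text line begidx endidx → Spec_complete_btc_pair text line begidx endidx (complete_btc_pair text line begidx endidx)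

-- ===== LEMMAS AND PROOFS =====

-- number of spaces in a character list (proof-side spec relating A's split to B's count)
def pvSpaces : List Char → Nat
  | [] => 0
  | c :: t => (if c = ' ' then 1 else 0) + pvSpaces t

theorem count_go_space (fuel : Nat) (l : List Char) (acc : Nat) (h : l.length ≤ fuel) :
    PySem.Chars.count.go [' '] fuel l acc = acc + pvSpaces l := by
  induction fuel generalizing l acc with
  | zero =>
    cases l with
    | nil => simp [PySem.Chars.count.go, pvSpaces]
    | cons c t => simp at h
  | succ fuel ih =>
    cases l with
    | nil => simp [PySem.Chars.count.go, pvSpaces]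
    | cons c t =>
      have hlen : t.length ≤ fuel := by simp at h; omega
      have hpre : ([' '].isPrefixOf (c :: t)) = (' ' == c) := by simp [List.isPrefixOf]
      simp only [PySem.Chars.count.go, hpre]
      by_cases hc : c = ' '
      · subst hc
        rw [if_pos (by simp)]
        simp only [List.length_cons, List.length_nil, List.drop_succ_cons, List.drop_zero]
        rw [ih t (acc + 1) hlen]
        simp [pvSpaces]
        omega
      · rw [if_neg (by simp; exact fun hxx => hc hxx.symm)]
        rw [ih t acc hlen]
        simp [pvSpaces, hc] <;> omega

theorem splitOn_go_space (fuel : Nat) (l cur : List Char) (acc : List (List Char))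
    (h : l.length ≤ fuel) :
    (PySem.Chars.splitOn.go [' '] fuel l cur acc).length = acc.length + 1 + pvSpaces l := by
  induction fuel generalizing l cur acc with
  | zero =>
    cases l with
    | nil => simp [PySem.Chars.splitOn.go, pvSpaces]
    | cons c t => simp at h
  | succ fuel ih =>
    cases l with
    | nil => simp [PySem.Chars.splitOn.go, pvSpaces]
    | cons c t =>
      have hlen : t.length ≤ fuel := by simp at h; omega
      have hpre : ([' '].isPrefixOf (c :: t)) = (' ' == c) := by simp [List.isPrefixOf]
      simp only [PySem.Chars.splitOn.go, hpre]
      by_cases hc : c = ' '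
      · subst hc
        rw [if_pos (by simp)]
        simp only [List.length_cons, List.length_nil, List.drop_succ_cons, List.drop_zero]
        rw [ih t [] (cur.reverse :: acc) hlen]
        simp [pvSpaces]
        omega
      · rw [if_neg (by simp; exact fun hxx => hc hxx.symm)]
        rw [ih t (c :: cur) acc hlen]
        simp [pvSpaces, hc] <;> omega

-- A's position (len(line.split(" ")) - 1) equals B's position (line.count(" "))
theorem positions_eq (line : String) :
    PySem.List.len (((PySem.Str.split? line " ").getD [])) - 1
      = ((PySem.Str.count line " " : Nat) : Int) := by
  have hs : PySem.Str.split? line " " = some ((PySem.Chars.splitOn line.toList [' ']).map String.ofList) := by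
    simp [PySem.Str.split?, PySem.Chars.split?]
  have h1 : (PySem.Chars.splitOn line.toList [' ']).length = 1 + pvSpaces line.toList := by
    simpa using splitOn_go_space (line.toList.length + 1) line.toList [] [] (by omega)
  have h2 : PySem.Str.count line " " = pvSpaces line.toList := by
    simp only [PySem.Str.count, PySem.Chars.count]
    simpa using count_go_space line.length line.toList 0 (by simp)
  rw [hs, h2]
  simp [PySem.List.len, h1]

-- ===== VERDICT (by name: the statement is the Claim_ definition above) =====
theorem complete_btc_pair_spec : Claim_equal_complete_btc_pair := by
  intro text line begidx endidx _
  unfold Spec_complete_btc_pair complete_btc_pair complete_btc_pair_alt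
  rw [positions_eq line]
  generalize (PySem.Str.count line " " : Int) = n
  by_cases h1 : n = 1
  · subst h1
    by_cases ht : text = ""
    · simp [ht, pvBtcCandidates, List.foldl] <;> decide
    · simp [ht, pvBtcCandidates, List.foldl, List.filter_cons]
      split_ifs <;> simp
  · by_cases h2 : n = 2
    · subst h2
      by_cases ht : text = ""
      · simp [ht, h1, pvBtcCandidates, List.foldl] <;> decide
      · simp [ht, h1, pvBtcCandidates, List.foldl, List.filter_cons]
        split_ifs <;> simp
    · by_cases h3 : n = 3
      · subst h3
        by_cases ht : text = ""
        · simp [ht, h1, pvBtcCandidates, List.foldl] <;> decide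
        · simp [ht, h1, pvBtcCandidates, List.foldl, List.filter_cons]
          split_ifs <;> simp
      · simp [h1, h2, h3, pvBtcCandidates, List.foldl,
          (Ne.symm h1), (Ne.symm h2), (Ne.symm h3)]
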